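-- pv_equiv track=rewrite | github.com/ignitedata-ai/rosetta-teamVyom-forge2026-igniteai-hackathon | core/rosetta/auditor.py | _ref_matches
-- ===== SOURCE A (Python) =====
-- def _ref_matches(target: str, universe: set[str]) -> bool:
--     target_clean = target.replace("$", "")
--     if target_clean in universe:
--         return True
--     # Case-insensitive sheet match as fallback
--     target_lower = target_clean.lower()
--     for v in universe:
--         if v.lower() == target_lower:
--             return True
--     return False
-- ===== SOURCE B (Python) =====
-- def _fold(c: str) -> str:
--     # ASCII case fold of a single character
--     return chr(ord(c) + 32) if 'A' <= c <= 'Z' else c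
--
--
-- def _eq_ci_skip_dollar(t: str, v: str) -> bool:
--     # two-pointer streaming comparison: t with '$' skipped equals v,
--     # case-insensitively, without building any intermediate string
--     i = j = 0
--     n, m = len(t), len(v)
--     while i < n:
--         c = t[i]
--         if c == '$':
--             i += 1
--             continue
--         if j >= m or _fold(c) != _fold(v[j]):
--             return False
--         i += 1
--         j += 1
--     return j == m
--
--
-- def _ref_matches(target: str, universe: set[str]) -> bool:
--     # the exact-match phase of the original is subsumed by the
--     # case-insensitive comparison, so one streaming pass per candidate suffices
--     return any(_eq_ci_skip_dollar(target, v) for v in universe)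
-- ===== Notes on version B (the rewrite author's own statement) =====
-- stated objective: alternative
-- what changed: A's exact-membership phase plus lowercase-and-compare scan is replaced by a single two-pointer streaming comparator per candidate that fuses '$'-stripping and per-character ASCII case folding, building no intermediate strings; the exact-match branch is subsumed by the case-insensitive comparison.
import Mathlib
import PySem

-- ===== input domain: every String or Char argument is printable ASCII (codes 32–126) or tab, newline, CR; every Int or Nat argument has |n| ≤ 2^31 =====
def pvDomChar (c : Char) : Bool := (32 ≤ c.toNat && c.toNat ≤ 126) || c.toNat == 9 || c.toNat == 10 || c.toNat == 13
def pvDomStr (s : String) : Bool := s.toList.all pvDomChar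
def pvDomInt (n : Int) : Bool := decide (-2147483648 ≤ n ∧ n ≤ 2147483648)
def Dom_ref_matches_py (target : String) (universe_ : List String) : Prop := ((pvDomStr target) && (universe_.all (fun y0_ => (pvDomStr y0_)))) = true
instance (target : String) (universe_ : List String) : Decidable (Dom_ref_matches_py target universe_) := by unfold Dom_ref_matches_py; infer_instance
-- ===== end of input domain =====

-- B replaces A's exact-match-then-lower-and-compare scan with a two-pointer streaming
-- comparator that fuses '$'-skipping and per-character case folding (no intermediate
-- strings; the exact branch is subsumed); objective: alternative.

-- ===== PORT A =====
def ref_matches_py (target : String) (universe_ : List String) : Bool :=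
  let target_clean := PySem.Str.replace target "$" ""
  if universe_.contains target_clean then true
  else
    let target_lower := PySem.Str.lower target_clean
    universe_.any (fun v => PySem.Str.lower v == target_lower)

-- ===== PORT B =====
-- _fold: ASCII case fold of one character (exactly Source B's _fold)
def bFold (c : Char) : Char :=
  if 'A' ≤ c ∧ c ≤ 'Z' then Char.ofNat (c.toNat + 32) else c

-- _eq_ci_skip_dollar: two-pointer streaming comparison, '$' skipped in t
def bEqCiSkip : List Char → List Char → Bool
  | [], v => v.isEmpty
  | c :: t, v =>
    if c = '$' then bEqCiSkip t v
    else
      match v with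
      | [] => false
      | b :: v' => (bFold c == bFold b) && bEqCiSkip t v'

def ref_matches_py_alt (target : String) (universe_ : List String) : Bool :=
  universe_.any (fun v => bEqCiSkip target.toList v.toList)

-- ===== PRECONDITION & SPEC =====
def Spec_ref_matches_py (target : String) (universe_ : List String) (out : Bool) : Prop := out = ref_matches_py_alt target universe_
instance (target : String) (universe_ : List String) (out : Bool) : Decidable (Spec_ref_matches_py target universe_ out) := by unfold Spec_ref_matches_py; infer_instance

-- ===== CLAIM (what is proved, stated in full; the proofs are below) =====
def Claim_equal_ref_matches_py : Prop := ∀ (target : String) (universe_ : List String), Dom_ref_matches_py target universe_ → Spec_ref_matches_py target universe_ (ref_matches_py target universe_)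

-- ===== LEMMAS AND PROOFS =====

-- bFold is exactly PySem's per-character lower
theorem bFold_eq_lowerChar (c : Char) : bFold c = PySem.Chars.lowerChar c := by
  simp [bFold, PySem.Chars.lowerChar, PySem.Chars.isupper]

-- replace.go with old = "$", new = "" is a filter
theorem replace_go_dollar (fuel : Nat) (l acc : List Char) (h : l.length ≤ fuel) :
    PySem.Chars.replace.go ['$'] [] fuel l acc
      = acc.reverse ++ l.filter (fun c => c ≠ '$') := by
  induction fuel generalizing l acc with
  | zero =>
    cases l with
    | nil => simp [PySem.Chars.replace.go]
    | cons c t => simp at h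
  | succ n ih =>
    cases l with
    | nil => simp [PySem.Chars.replace.go]
    | cons c t =>
      simp only [List.length_cons, Nat.succ_le_succ_iff] at h
      by_cases hc : c = '$'
      · subst hc
        rw [show PySem.Chars.replace.go ['$'] [] (n+1) ('$' :: t) acc
              = PySem.Chars.replace.go ['$'] [] n t acc by
            simp [PySem.Chars.replace.go, List.isPrefixOf]]
        rw [ih t acc h]
        simp
      · have hc' : ¬('$' = c) := fun e => hc e.symm
        rw [show PySem.Chars.replace.go ['$'] [] (n+1) (c :: t) acc
              = PySem.Chars.replace.go ['$'] [] n t (c :: acc) by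
            simp [PySem.Chars.replace.go, List.isPrefixOf, hc']]
        rw [ih t (c :: acc) h]
        simp [hc]

theorem replace_dollar (s : List Char) :
    PySem.Chars.replace s ['$'] [] = s.filter (fun c => c ≠ '$') := by
  rw [PySem.Chars.replace]
  simp [replace_go_dollar s.length s [] le_rfl]

-- the streaming comparator decides equality of folded, '$'-filtered strings
theorem bEqCiSkip_eq (t v : List Char) :
    bEqCiSkip t v
      = ((t.filter (fun c => c ≠ '$')).map bFold == v.map bFold) := by
  induction t generalizing v with
  | nil =>
    cases v with
    | nil => simp [bEqCiSkip]
    | cons b v' => simp [bEqCiSkip]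
  | cons c t ih =>
    by_cases hc : c = '$'
    · subst hc
      simp [bEqCiSkip, ih]
    · cases v with
      | nil => simp [bEqCiSkip, hc]
      | cons b v' =>
        simp [bEqCiSkip, hc, ih v']

-- pointwise: A's comparison of a candidate equals B's streaming comparator
theorem elem_eq (target v : String) :
    (PySem.Str.lower v == PySem.Str.lower (PySem.Str.replace target "$" ""))
      = bEqCiSkip target.toList v.toList := by
  rw [bEqCiSkip_eq]
  have hrep : (PySem.Str.replace target "$" "").toList
      = target.toList.filter (fun c => c ≠ '$') := by
    rw [PySem.Str.toList_replace]
    simpa using replace_dollar target.toList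
  have h1 : (PySem.Str.lower v).toList = v.toList.map bFold := by
    simp [PySem.Str.toList_lower, PySem.Chars.lower, bFold_eq_lowerChar]
  have h2 : (PySem.Str.lower (PySem.Str.replace target "$" "")).toList
      = (target.toList.filter (fun c => c ≠ '$')).map bFold := by
    simp [PySem.Str.toList_lower, PySem.Chars.lower, hrep, bFold_eq_lowerChar]
  rw [Bool.eq_iff_iff, beq_iff_eq, beq_iff_eq]
  constructor
  · intro h
    have := congrArg String.toList h
    rw [h1, h2] at this
    exact this.symm
  · intro h
    apply String.toList_inj.mp
    rw [h1, h2]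
    exact h.symm

theorem ref_matches_eq (target : String) (universe_ : List String) :
    ref_matches_py target universe_ = ref_matches_py_alt target universe_ := by
  unfold ref_matches_py ref_matches_py_alt
  by_cases h : (PySem.Str.replace target "$" "") ∈ universe_
  · simp only [List.contains_eq_mem, h, decide_true, if_true]
    symm
    rw [List.any_eq_true]
    refine ⟨PySem.Str.replace target "$" "", h, ?_⟩
    rw [← elem_eq]
    simp
  · simp only [List.contains_eq_mem, h, decide_false, Bool.false_eq_true, if_false]
    exact congrArg universe_.any (funext (fun v => elem_eq target v))

-- ===== VERDICT (by name: the statement is the Claim_ definition above) =====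
theorem ref_matches_py_spec : Claim_equal_ref_matches_py := by
  intro target universe_ _
  unfold Spec_ref_matches_py
  exact ref_matches_eq target universe_
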